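-- pv_equiv track=rewrite | github.com/S4r3n/python_exercises | time-calculator/time_calculator.py | diaSemana
-- ===== SOURCE A (Python) =====
-- def diaSemana(day,datos):
--   diaFinal=''
--   if day != '':
--     diaFinal = day.lower()
--     dias = datos[3] % 7
--
--     for d in range(dias):
--       if diaFinal == "monday":
--         diaFinal = "tuesday"
--         continue
--       if diaFinal == "tuesday":
--         diaFinal = "wednesday"
--         continue
--       if diaFinal == "wednesday":
--         diaFinal = "thursday"
--         continue
--       if diaFinal == "thursday":
--         diaFinal = "friday"
--         continue
--       if diaFinal == "friday":
--         diaFinal = "saturday"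
--         continue
--       if diaFinal == "saturday":
--         diaFinal = "sunday"
--         continue
--       if diaFinal == "sunday":
--         diaFinal = "monday"
--         continue
--
--     return ', ' + diaFinal.capitalize()
--   else:
--    return ''
-- ===== SOURCE B (Python) =====
-- DAYS = ['monday', 'tuesday', 'wednesday', 'thursday', 'friday', 'saturday', 'sunday']
--
-- def diaSemana(day, datos):
--     if day == '':
--         return ''
--     d = day.lower()
--     if d in DAYS:
--         d = DAYS[(DAYS.index(d) + datos[3]) % 7]
--     return ', ' + d.capitalize()
-- ===== Notes on version B (the rewrite author's own statement) =====
-- stated objective: idiomatic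
-- what changed: replaces the bounded step-by-step if-chain loop over range(datos[3]%7) by a single modular index lookup in a weekday table, keeping the unknown-day passthrough
import Mathlib
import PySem

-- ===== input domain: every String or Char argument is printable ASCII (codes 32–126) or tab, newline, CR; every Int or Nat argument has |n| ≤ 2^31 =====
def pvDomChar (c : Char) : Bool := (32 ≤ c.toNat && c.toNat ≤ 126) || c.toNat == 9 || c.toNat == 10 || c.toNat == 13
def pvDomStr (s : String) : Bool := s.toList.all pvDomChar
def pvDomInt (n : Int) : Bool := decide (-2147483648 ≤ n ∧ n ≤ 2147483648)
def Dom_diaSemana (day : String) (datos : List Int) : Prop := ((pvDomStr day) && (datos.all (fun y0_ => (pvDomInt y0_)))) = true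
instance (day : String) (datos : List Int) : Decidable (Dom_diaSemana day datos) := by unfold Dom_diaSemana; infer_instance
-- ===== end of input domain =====

-- B replaces A's step-by-step if-chain loop by one modular table lookup (idiomatic, same cost).

-- str.capitalize(): first char uppercased, rest lowercased; exact on the ASCII domain.
def pvCap (s : String) : String :=
  match s.toList with
  | [] => ""
  | c :: cs => String.ofList (PySem.Chars.upperChar c :: cs.map PySem.Chars.lowerChar)

-- ===== PORT A =====
-- the body of A's for-loop: the if/continue chain, in order
def pvStep (d : String) : String :=
  if d = "monday" then "tuesday"
  else if d = "tuesday" then "wednesday"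
  else if d = "wednesday" then "thursday"
  else if d = "thursday" then "friday"
  else if d = "friday" then "saturday"
  else if d = "saturday" then "sunday"
  else if d = "sunday" then "monday"
  else d

def diaSemana (day : String) (datos : List Int) : String :=
  if day ≠ "" then
    let diaFinal := PySem.Str.lower day
    match PySem.List.pyGet? datos 3 with
    | none => ""   -- IndexError; excluded by Pre_
    | some v =>
      let dias := PySem.Int.mod v 7
      let diaFinal := (PySem.List.pyRange 0 dias 1).foldl (fun df _ => pvStep df) diaFinal
      ", " ++ pvCap diaFinal
  else ""

-- ===== PORT B =====
def pvDays : List String :=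
  ["monday", "tuesday", "wednesday", "thursday", "friday", "saturday", "sunday"]

def diaSemana_alt (day : String) (datos : List Int) : String :=
  if day = "" then ""
  else
    let d := PySem.Str.lower day
    let d :=
      if d ∈ pvDays then
        match PySem.List.index? pvDays d, PySem.List.pyGet? datos 3 with
        | some i, some v => pvDays.getD (PySem.Int.mod ((i : Int) + v) 7).toNat d
        | _, _ => d   -- IndexError on datos[3]; excluded by Pre_
      else d
    ", " ++ pvCap d

-- ===== PRECONDITION & SPEC =====
-- A reads datos[3] whenever day ≠ ''; shorter datos then raises IndexError.
def Pre_diaSemana (day : String) (datos : List Int) : Prop :=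
  day = "" ∨ 4 ≤ datos.length
instance (day : String) (datos : List Int) : Decidable (Pre_diaSemana day datos) := by
  unfold Pre_diaSemana; infer_instance

def pvWitness_diaSemana : String × List Int := ("monday", [0, 0, 0, 3])

def Spec_diaSemana (day : String) (datos : List Int) (out : String) : Prop := out = diaSemana_alt day datos
instance (day : String) (datos : List Int) (out : String) : Decidable (Spec_diaSemana day datos out) := by unfold Spec_diaSemana; infer_instance

-- ===== CLAIM (what is proved, stated in full; the proofs are below) =====
def Claim_equal_diaSemana : Prop := ∀ (day : String) (datos : List Int), Dom_diaSemana day datos → Pre_diaSemana day datos → Spec_diaSemana day datos (diaSemana day datos)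

-- ===== LEMMAS AND PROOFS =====

-- pvStep leaves a string that is no weekday name unchanged
theorem pvStep_fix (d : String) (h : d ∉ pvDays) : pvStep d = d := by
  simp [pvDays] at h
  simp [pvStep, h.1, h.2.1, h.2.2.1, h.2.2.2.1, h.2.2.2.2.1, h.2.2.2.2.2.1, h.2.2.2.2.2.2]

theorem foldl_fix {α β : Type} (g : α → α) (l : List β) (d : α) (h : g d = d) :
    l.foldl (fun x _ => g x) d = d := by
  induction l with
  | nil => rfl
  | cons b bs ih => simpa [List.foldl, h] using ih

theorem pvModAdd (i v : Int) :
    PySem.Int.mod (i + v) 7 = PySem.Int.mod (i + PySem.Int.mod v 7) 7 := by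
  rw [PySem.Int.mod_eq_emod_of_pos (by norm_num), PySem.Int.mod_eq_emod_of_pos (by norm_num),
    PySem.Int.mod_eq_emod_of_pos (by norm_num)]
  omega

theorem diaSemana_spec : Claim_equal_diaSemana := by
  intro day datos _hdom hpre
  unfold Spec_diaSemana
  by_cases hd : day = ""
  · simp [diaSemana, diaSemana_alt, hd]
  · have hlen : 4 ≤ datos.length := by
      rcases hpre with h | h
      · exact absurd h hd
      · exact h
    have hg : PySem.List.pyGet? datos 3 = some datos[3] := by
      have := PySem.List.pyGet?_ofNat datos 3 (by omega)
      simpa using this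
    have hk0 : 0 ≤ PySem.Int.mod datos[3] 7 := PySem.Int.mod_nonneg _ (by norm_num)
    have hk7 : PySem.Int.mod datos[3] 7 < 7 := PySem.Int.mod_lt _ (by norm_num)
    by_cases hmem : PySem.Str.lower day ∈ pvDays
    · -- weekday case: locate the name in the table, then 7 × 7 closed computations
      obtain ⟨j, hj, hjd⟩ := List.mem_iff_getElem.mp hmem
      have hj7 : j < 7 := by simpa [pvDays] using hj
      have hjq : pvDays[j]? = some (PySem.Str.lower day) := by
        rw [List.getElem?_eq_getElem hj, hjd]
      have hidx : PySem.List.index? pvDays (PySem.Str.lower day) = some j := by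
        interval_cases j <;> (rw [← Option.some_inj.mp hjq]; decide)
      simp only [diaSemana, diaSemana_alt, hg, hidx, ne_eq, hd, not_false_iff, if_true,
        if_pos hmem, if_false]
      rw [pvModAdd]
      generalize PySem.Int.mod datos[3] 7 = k at hk0 hk7 ⊢
      interval_cases j <;> rw [← Option.some_inj.mp hjq] <;> interval_cases k <;> decide
    · -- unknown-name case: A's loop body is the identity, B skips the lookup
      have hfix : pvStep (PySem.Str.lower day) = PySem.Str.lower day := pvStep_fix _ hmem
      simp [diaSemana, diaSemana_alt, hd, hg, hmem, foldl_fix _ _ _ hfix]
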